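-- pv_equiv track=rewrite | github.com/TimNoordman/TelegramBot-OpenAI-API | src/api_perplexity_search.py | format_headers_for_telegram
-- ===== SOURCE A (Python) =====
-- def format_headers_for_telegram(translated_response):
--     lines = translated_response.split('\n')
--     formatted_lines = []
--
--     for i, line in enumerate(lines):
--         if line.startswith('####'):
--             if i > 0 and lines[i - 1].strip() != '':
--                 formatted_lines.append('')
--             formatted_line = '◦ <b>' + line[4:].strip() + '</b>'
--             formatted_lines.append(formatted_line)
--             if i < len(lines) - 1 and lines[i + 1].strip() != '':
--                 formatted_lines.append('')
--         elif line.startswith('###'):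
--             if i > 0 and lines[i - 1].strip() != '':
--                 formatted_lines.append('')
--             formatted_line = '• <b>' + line[3:].strip() + '</b>'
--             formatted_lines.append(formatted_line)
--             if i < len(lines) - 1 and lines[i + 1].strip() != '':
--                 formatted_lines.append('')
--         elif line.startswith('##'):
--             if i > 0 and lines[i - 1].strip() != '':
--                 formatted_lines.append('')
--             formatted_line = '➤ <b>' + line[2:].strip() + '</b>'
--             formatted_lines.append(formatted_line)
--             if i < len(lines) - 1 and lines[i + 1].strip() != '':
--                 formatted_lines.append('')
--         else:
--             formatted_lines.append(line)
--
--     formatted_response = '\n'.join(formatted_lines)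
--     return formatted_response
-- ===== SOURCE B (Python) =====
-- def format_headers_for_telegram(translated_response):
--     # Single pass with carried state instead of index lookbehind/lookahead:
--     # a header's "blank line after" is deferred and emitted when the next
--     # line is seen (and found non-blank); the "blank line before" uses the
--     # remembered non-emptiness of the previous line.
--     out = []
--     prev_nonempty = False
--     prev_header = False
--     for line in translated_response.split('\n'):
--         cur_nonempty = line.strip() != ''
--         if prev_header and cur_nonempty:
--             out.append('')
--         for prefix, opener in (('####', '\u25e6 <b>'), ('###', '\u2022 <b>'), ('##', '\u27a4 <b>')):
--             if line.startswith(prefix):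
--                 if prev_nonempty:
--                     out.append('')
--                 out.append(opener + line[len(prefix):].strip() + '</b>')
--                 prev_header = True
--                 break
--         else:
--             out.append(line)
--             prev_header = False
--         prev_nonempty = cur_nonempty
--     return '\n'.join(out)
-- ===== Notes on version B (the rewrite author's own statement) =====
-- stated objective: alternative
-- what changed: Replaces A's indexed loop with lookbehind/lookahead (lines[i-1], lines[i+1]) by a single stateful pass that carries the previous line's non-emptiness and header-ness, deferring each header's trailing blank line until the next line is seen, and replaces the if/elif prefix chain by a prefix table scanned in order.
import Mathlib
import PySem

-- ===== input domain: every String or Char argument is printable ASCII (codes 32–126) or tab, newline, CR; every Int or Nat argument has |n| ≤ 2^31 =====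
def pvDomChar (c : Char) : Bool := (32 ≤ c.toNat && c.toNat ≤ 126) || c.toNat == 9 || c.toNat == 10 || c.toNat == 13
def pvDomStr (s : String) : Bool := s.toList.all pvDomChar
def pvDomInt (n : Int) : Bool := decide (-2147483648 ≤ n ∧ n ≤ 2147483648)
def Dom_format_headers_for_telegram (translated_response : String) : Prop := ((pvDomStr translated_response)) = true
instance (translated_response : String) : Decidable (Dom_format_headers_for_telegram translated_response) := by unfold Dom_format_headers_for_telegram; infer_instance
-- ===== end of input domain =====

-- B replaces A's indexed lookbehind/lookahead loop by a single stateful pass (alternative decomposition, same cost).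

-- ===== PORT A =====
-- A's loop body: for i, line in enumerate(lines), indexed neighbour access guarded by i>0 / i<len-1.
def pvStepA (lines : List String) (acc : List String) (p : Int × String) : List String :=
  let i := p.1
  let line := p.2
  if PySem.Str.startswith line "####" then
    let acc := if i > 0 && (PySem.Str.strip (PySem.List.pyGetD lines (i - 1) "") != "") then acc ++ [""] else acc
    let acc := acc ++ ["◦ <b>" ++ PySem.Str.strip (PySem.Str.slice line (some 4) none) ++ "</b>"]
    if i < PySem.List.len lines - 1 && (PySem.Str.strip (PySem.List.pyGetD lines (i + 1) "") != "") then acc ++ [""] else acc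
  else if PySem.Str.startswith line "###" then
    let acc := if i > 0 && (PySem.Str.strip (PySem.List.pyGetD lines (i - 1) "") != "") then acc ++ [""] else acc
    let acc := acc ++ ["• <b>" ++ PySem.Str.strip (PySem.Str.slice line (some 3) none) ++ "</b>"]
    if i < PySem.List.len lines - 1 && (PySem.Str.strip (PySem.List.pyGetD lines (i + 1) "") != "") then acc ++ [""] else acc
  else if PySem.Str.startswith line "##" then
    let acc := if i > 0 && (PySem.Str.strip (PySem.List.pyGetD lines (i - 1) "") != "") then acc ++ [""] else acc
    let acc := acc ++ ["➤ <b>" ++ PySem.Str.strip (PySem.Str.slice line (some 2) none) ++ "</b>"]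
    if i < PySem.List.len lines - 1 && (PySem.Str.strip (PySem.List.pyGetD lines (i + 1) "") != "") then acc ++ [""] else acc
  else
    acc ++ [line]

def format_headers_for_telegram (translated_response : String) : String :=
  PySem.Str.join "\n"
    ((PySem.List.enumerate ((PySem.Str.split? translated_response "\n").getD [])).foldl
      (pvStepA ((PySem.Str.split? translated_response "\n").getD [])) [])

-- ===== PORT B =====
def pvTable : List (String × String) := [("####", "◦ <b>"), ("###", "• <b>"), ("##", "➤ <b>")]

-- B's loop body: state (out, prev_nonempty, prev_header); the first matching table prefix wins.
def pvStepB (st : List String × Bool × Bool) (line : String) : List String × Bool × Bool :=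
  let out := st.1
  let prevNE := st.2.1
  let prevH := st.2.2
  let cur := PySem.Str.strip line != ""
  let out := if prevH && cur then out ++ [""] else out
  match pvTable.find? (fun pr => PySem.Str.startswith line pr.1) with
  | some pr =>
      let out := if prevNE then out ++ [""] else out
      (out ++ [pr.2 ++ PySem.Str.strip (PySem.Str.slice line (some (PySem.Str.len pr.1)) none) ++ "</b>"], cur, true)
  | none => (out ++ [line], cur, false)

def format_headers_for_telegram_alt (translated_response : String) : String :=
  PySem.Str.join "\n"
    ((((PySem.Str.split? translated_response "\n").getD []).foldl pvStepB ([], false, false)).1)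

-- ===== PRECONDITION & SPEC =====
def Spec_format_headers_for_telegram (translated_response : String) (out : String) : Prop := out = format_headers_for_telegram_alt translated_response
instance (translated_response : String) (out : String) : Decidable (Spec_format_headers_for_telegram translated_response out) := by unfold Spec_format_headers_for_telegram; infer_instance

-- ===== CLAIM (what is proved, stated in full; the proofs are below) =====
def Claim_equal_format_headers_for_telegram : Prop := ∀ (translated_response : String), Dom_format_headers_for_telegram translated_response → Spec_format_headers_for_telegram translated_response (format_headers_for_telegram translated_response)

-- ===== LEMMAS AND PROOFS =====
def pvNE (line : String) : Bool := PySem.Str.strip line != ""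

def pvIsH (line : String) : Bool := PySem.Str.startswith line "##"

def pvFmt (line : String) : String :=
  if PySem.Str.startswith line "####" then "◦ <b>" ++ PySem.Str.strip (PySem.Str.slice line (some 4) none) ++ "</b>"
  else if PySem.Str.startswith line "###" then "• <b>" ++ PySem.Str.strip (PySem.Str.slice line (some 3) none) ++ "</b>"
  else "➤ <b>" ++ PySem.Str.strip (PySem.Str.slice line (some 2) none) ++ "</b>"

def pvHeadNE : List String → Bool
  | [] => false
  | x :: _ => pvNE x

-- the per-line contributions of A, with the lookahead/lookbehind made structural
def pvASeg : Bool → List String → List String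
  | _, [] => []
  | prevNE, x :: rest =>
    (if pvIsH x then
      (if prevNE then [""] else []) ++ [pvFmt x] ++ (if pvHeadNE rest then [""] else [])
     else [x]) ++ pvASeg (pvNE x) rest

-- the per-line contributions of B
def pvBSeg : Bool → Bool → List String → List String
  | _, _, [] => []
  | prevH, prevNE, x :: rest =>
    (if prevH && pvNE x then [""] else []) ++
    (if pvIsH x then (if prevNE then [""] else []) ++ [pvFmt x] else [x]) ++
    pvBSeg (pvIsH x) (pvNE x) rest

theorem pv_h4_h2 (s : String) (h : PySem.Str.startswith s "####" = true) : PySem.Str.startswith s "##" = true := by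
  simp [PySem.Str.startswith_eq, PySem.Chars.startswith] at *
  exact List.IsPrefix.trans (by decide) h

theorem pv_h3_h2 (s : String) (h : PySem.Str.startswith s "###" = true) : PySem.Str.startswith s "##" = true := by
  simp [PySem.Str.startswith_eq, PySem.Chars.startswith] at *
  exact List.IsPrefix.trans (by decide) h

theorem pvC_h4_h2 (l : List Char) (h : PySem.Chars.startswith l ['#','#','#','#'] = true) : PySem.Chars.startswith l ['#','#'] = true := by
  simp [PySem.Chars.startswith] at *
  exact List.IsPrefix.trans (by decide) h

theorem pvC_h3_h2 (l : List Char) (h : PySem.Chars.startswith l ['#','#','#'] = true) : PySem.Chars.startswith l ['#','#'] = true := by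
  simp [PySem.Chars.startswith] at *
  exact List.IsPrefix.trans (by decide) h

theorem pvB_fold (l : List String) (out : List String) (prevNE prevH : Bool) :
    (l.foldl pvStepB (out, prevNE, prevH)).1 = out ++ pvBSeg prevH prevNE l := by
  induction l generalizing out prevNE prevH with
  | nil => simp [pvBSeg]
  | cons x rest ih =>
    simp only [List.foldl_cons, pvStepB, pvTable, List.find?]
    by_cases h4 : PySem.Str.startswith x "####" = true
    · simp [h4, ih, pvBSeg, pvIsH, pv_h4_h2 x h4, pvFmt, pvNE, pvC_h4_h2, pvC_h3_h2,
        (by decide : "####".length = 4)]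
      split_ifs <;> simp_all [pvC_h4_h2, pvC_h3_h2, (by decide : "####".length = 4), (by decide : "###".length = 3), (by decide : "##".length = 2)]
    · by_cases h3 : PySem.Str.startswith x "###" = true
      · simp [h4, h3, ih, pvBSeg, pvIsH, pv_h3_h2 x h3, pvFmt, pvNE, pvC_h4_h2, pvC_h3_h2,
          (by decide : "###".length = 3)]
        split_ifs <;> simp_all [pvC_h4_h2, pvC_h3_h2, (by decide : "####".length = 4), (by decide : "###".length = 3), (by decide : "##".length = 2)]
      · by_cases h2 : PySem.Str.startswith x "##" = true
        · simp [h4, h3, h2, ih, pvBSeg, pvIsH, pvFmt, pvNE, pvC_h4_h2, pvC_h3_h2,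
            (by decide : "##".length = 2)]
          split_ifs <;> simp_all [pvC_h4_h2, pvC_h3_h2, (by decide : "####".length = 4), (by decide : "###".length = 3), (by decide : "##".length = 2)]
        · simp [h4, h3, h2, ih, pvBSeg, pvIsH, pvNE]
          split_ifs <;> simp_all

theorem pvSeg_eq (l : List String) (prevH prevNE : Bool) :
    pvBSeg prevH prevNE l = (if prevH && pvHeadNE l then [""] else []) ++ pvASeg prevNE l := by
  induction l generalizing prevH prevNE with
  | nil => simp [pvBSeg, pvASeg, pvHeadNE]
  | cons x rest ih =>
    simp only [pvBSeg, pvASeg, pvHeadNE, ih]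
    by_cases hH : pvIsH x = true <;> simp [hH] <;> split_ifs <;> simp

def pvPrevNE (lines : List String) (i : Int) : Bool :=
  decide (i > 0) && (PySem.Str.strip (PySem.List.pyGetD lines (i - 1) "") != "")

theorem pvStepA_h4 (lines : List String) (x : String) (rest' : List String) (i : Nat) (acc : List String)
    (hnext : (decide ((i : Int) < PySem.List.len lines - 1)
        && (PySem.Str.strip (PySem.List.pyGetD lines ((i : Int) + 1) "") != "")) = pvHeadNE rest')
    (h4 : PySem.Str.startswith x "####" = true) :
    pvStepA lines acc ((i : Int), x) ++ pvASeg (pvNE x) rest'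
        = acc ++ pvASeg (pvPrevNE lines i) (x :: rest') := by
  rw [pvASeg, ← hnext]
  simp only [pvStepA, pvPrevNE, pvIsH, pvFmt, h4, pv_h4_h2 x h4, if_true]
  split_ifs <;> simp_all

theorem pvStepA_h3 (lines : List String) (x : String) (rest' : List String) (i : Nat) (acc : List String)
    (hnext : (decide ((i : Int) < PySem.List.len lines - 1)
        && (PySem.Str.strip (PySem.List.pyGetD lines ((i : Int) + 1) "") != "")) = pvHeadNE rest')
    (h4 : ¬ PySem.Str.startswith x "####" = true)
    (h3 : PySem.Str.startswith x "###" = true) :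
    pvStepA lines acc ((i : Int), x) ++ pvASeg (pvNE x) rest'
        = acc ++ pvASeg (pvPrevNE lines i) (x :: rest') := by
  rw [pvASeg, ← hnext]
  simp only [pvStepA, pvPrevNE, pvIsH, pvFmt, h4, h3, pv_h3_h2 x h3, if_true, if_false]
  split_ifs <;> simp_all

theorem pvStepA_h2 (lines : List String) (x : String) (rest' : List String) (i : Nat) (acc : List String)
    (hnext : (decide ((i : Int) < PySem.List.len lines - 1)
        && (PySem.Str.strip (PySem.List.pyGetD lines ((i : Int) + 1) "") != "")) = pvHeadNE rest')
    (h4 : ¬ PySem.Str.startswith x "####" = true)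
    (h3 : ¬ PySem.Str.startswith x "###" = true)
    (h2 : PySem.Str.startswith x "##" = true) :
    pvStepA lines acc ((i : Int), x) ++ pvASeg (pvNE x) rest'
        = acc ++ pvASeg (pvPrevNE lines i) (x :: rest') := by
  rw [pvASeg, ← hnext]
  simp only [pvStepA, pvPrevNE, pvIsH, pvFmt, h4, h3, h2, if_true, if_false]
  split_ifs <;> simp_all

theorem pvStepA_none (lines : List String) (x : String) (rest' : List String) (i : Nat) (acc : List String)
    (h2 : ¬ PySem.Str.startswith x "##" = true) :
    pvStepA lines acc ((i : Int), x) ++ pvASeg (pvNE x) rest'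
        = acc ++ pvASeg (pvPrevNE lines i) (x :: rest') := by
  have h4 : ¬ PySem.Str.startswith x "####" = true := fun h => h2 (pv_h4_h2 x h)
  have h3 : ¬ PySem.Str.startswith x "###" = true := fun h => h2 (pv_h3_h2 x h)
  rw [pvASeg]
  simp only [pvStepA, pvIsH, h4, h3, h2, if_false]
  simp [h2]

set_option maxRecDepth 10000 in
theorem pvA_fold (lines : List String) (rest : List String) (i : Nat)
    (hd : lines.drop i = rest) (acc : List String) :
    (PySem.List.enumerate rest (i : Int)).foldl (pvStepA lines) acc
      = acc ++ pvASeg (pvPrevNE lines i) rest := by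
  induction rest generalizing i acc with
  | nil => simp [PySem.List.enumerate, pvASeg]
  | cons x rest' ih =>
    have hx : lines[i]? = some x := by
      have := congrArg (·[0]?) hd
      simpa [List.getElem?_drop] using this
    have hd' : lines.drop (i + 1) = rest' := by
      have h1 : lines.drop (i + 1) = (lines.drop i).drop 1 := by
        rw [List.drop_drop]
      simp [h1, hd]
    have h3 : i < lines.length := by
      by_contra hcon
      rw [List.drop_eq_nil_of_le (by omega)] at hd
      simp at hd
    have hlen : lines.length = i + 1 + rest'.length := by
      have h2 := congrArg List.length hd
      simp at h2
      omega
    -- next-line condition of A at index i equals pvHeadNE rest'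
    have hnext : (decide ((i : Int) < PySem.List.len lines - 1)
        && (PySem.Str.strip (PySem.List.pyGetD lines ((i : Int) + 1) "") != "")) = pvHeadNE rest' := by
      cases rest' with
      | nil =>
        have h4 : lines.length = i + 1 := by simp at hlen; omega
        simp [pvHeadNE, PySem.List.len_eq, h4]
      | cons y rest'' =>
        have hy : lines[i + 1]? = some y := by
          have := congrArg (·[0]?) hd'
          simpa [List.getElem?_drop] using this
        simp only [List.length_cons] at hlen
        have h1 : ((i : Int) + 1) = (((i + 1 : Nat)) : Int) := by push_cast; ring
        have hlt : (i : Int) < PySem.List.len lines - 1 := by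
          rw [PySem.List.len_eq]; omega
        rw [h1, PySem.List.pyGetD_natCast]
        have h5 : lines.getD (i + 1) "" = y := by simp [List.getD_eq_getElem?_getD, hy]
        rw [h5]
        simp only [pvHeadNE, pvNE, PySem.List.len_eq] at *
        simp [hlt]
    -- prev-line condition for the next iteration equals pvNE x
    have hprev : pvPrevNE lines (((i + 1 : Nat)) : Int) = pvNE x := by
      have h1 : (((i + 1 : Nat)) : Int) - 1 = ((i : Nat) : Int) := by push_cast; ring
      unfold pvPrevNE
      rw [h1, PySem.List.pyGetD_natCast]
      have h5 : lines.getD i "" = x := by simp [List.getD_eq_getElem?_getD, hx]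
      rw [h5]
      simp [pvNE]
    have hcast : ((i : Int) + 1) = (((i + 1 : Nat)) : Int) := by push_cast; ring
    rw [PySem.List.enumerate_cons, List.foldl_cons, hcast, ih (i + 1) hd', hprev]
    show pvStepA lines acc ((i : Int), x) ++ pvASeg (pvNE x) rest'
        = acc ++ pvASeg (pvPrevNE lines i) (x :: rest')
    by_cases h4 : PySem.Str.startswith x "####" = true
    · exact pvStepA_h4 lines x rest' i acc hnext h4
    · by_cases h3 : PySem.Str.startswith x "###" = true
      · exact pvStepA_h3 lines x rest' i acc hnext h4 h3
      · by_cases h2 : PySem.Str.startswith x "##" = true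
        · exact pvStepA_h2 lines x rest' i acc hnext h4 h3 h2
        · exact pvStepA_none lines x rest' i acc h2

-- ===== VERDICT (by name: the statement is the Claim_ definition above) =====
theorem format_headers_for_telegram_spec : Claim_equal_format_headers_for_telegram := by
  intro s _
  unfold Spec_format_headers_for_telegram
  have hA := pvA_fold ((PySem.Str.split? s "\n").getD []) ((PySem.Str.split? s "\n").getD []) 0 (by simp) []
  have hB := pvB_fold ((PySem.Str.split? s "\n").getD []) [] false false
  simp only [Nat.cast_zero] at hA
  unfold format_headers_for_telegram format_headers_for_telegram_alt at *
  rw [hB, hA]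
  simp [pvPrevNE, pvSeg_eq]
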